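-- pv_equiv track=rewrite | github.com/CraftsMan-Labs/SimpleTools | simpletools/fuzzy_patch.py | _map_ws_collapsed_positions
-- ===== SOURCE A (Python) =====
-- def _map_ws_collapsed_positions(
--     original: str, normalized: str, hits: list[tuple[int, int]]
-- ) -> list[tuple[int, int]]:
--     o2n: list[int] = []
--     oi = ni = 0
--     while oi < len(original) and ni < len(normalized):
--         if original[oi] == normalized[ni]:
--             o2n.append(ni)
--             oi += 1
--             ni += 1
--         elif original[oi] in " \t" and normalized[ni] == " ":
--             o2n.append(ni)
--             oi += 1
--             if oi >= len(original) or original[oi] not in " \t":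
--                 ni += 1
--         elif original[oi] in " \t":
--             o2n.append(ni)
--             oi += 1
--         else:
--             o2n.append(ni)
--             oi += 1
--     while oi < len(original):
--         o2n.append(len(normalized))
--         oi += 1
--     norm_to_start: dict[int, int] = {}
--     norm_to_end: dict[int, int] = {}
--     for op, np in enumerate(o2n):
--         norm_to_start.setdefault(np, op)
--         norm_to_end[np] = op
--     mapped: list[tuple[int, int]] = []
--     for ns, ne in hits:
--         os_ = norm_to_start.get(ns, min(i for i, n in enumerate(o2n) if n >= ns))
--         if ne - 1 in norm_to_end:
--             oe = norm_to_end[ne - 1] + 1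
--         else:
--             oe = os_ + max(1, ne - ns)
--         while oe < len(original) and original[oe] in " \t":
--             oe += 1
--         mapped.append((os_, min(oe, len(original))))
--     return mapped
-- ===== SOURCE B (Python) =====
-- def _bisect_left_i(a, x):
--     lo, hi = 0, len(a)
--     while lo < hi:
--         mid = (lo + hi) // 2
--         if a[mid] < x:
--             lo = mid + 1
--         else:
--             hi = mid
--     return lo
--
--
-- def _bisect_right_i(a, x):
--     lo, hi = 0, len(a)
--     while lo < hi:
--         mid = (lo + hi) // 2
--         if x < a[mid]:
--             hi = mid
--         else:
--             lo = mid + 1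
--     return lo
--
--
-- def _map_ws_collapsed_positions(
--     original: str, normalized: str, hits: list[tuple[int, int]]
-- ) -> list[tuple[int, int]]:
--     n = len(normalized)
--     L = len(original)
--     # one pass: every original position gets the current normalized position;
--     # positions past the end of the alignment get n automatically.
--     o2n: list[int] = []
--     ni = 0
--     for oi in range(L):
--         o2n.append(ni)
--         if ni < n:
--             ch = original[oi]
--             if ch == normalized[ni]:
--                 ni += 1
--             elif ch in " \t" and normalized[ni] == " " and (
--                 oi + 1 >= L or original[oi + 1] not in " \t"
--             ):
--                 ni += 1
--     # next non-whitespace position at or after i (right-to-left sweep)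
--     nxt = [L] * (L + 1)
--     for i in range(L - 1, -1, -1):
--         nxt[i] = i if original[i] not in " \t" else nxt[i + 1]
--     # o2n is non-decreasing: first/last occurrence lookups are binary searches
--     mapped: list[tuple[int, int]] = []
--     for ns, ne in hits:
--         os_ = _bisect_left_i(o2n, ns)
--         j = _bisect_right_i(o2n, ne - 1)
--         if j > 0 and o2n[j - 1] == ne - 1:
--             oe = j
--         else:
--             oe = os_ + max(1, ne - ns)
--         mapped.append((os_, nxt[oe] if oe < L else L))
--     return mapped
-- ===== Notes on version B (the rewrite author's own statement) =====
-- stated objective: faster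
-- what changed: B builds the o2n alignment in a single pass over original (A uses two while loops), replaces A's two dictionaries plus per-hit linear min-scan fallback by binary searches (bisect_left/bisect_right) on the monotone o2n array, and replaces A's per-hit trailing-whitespace while loop by a precomputed next-non-whitespace table.
-- crash fix: A raises ValueError (min() of an empty generator) exactly when some hit start exceeds every aligned normalized position (in particular whenever original is empty and hits is not); B returns there, mapping such a hit's start to len(original) via bisect_left. — e.g. on _map_ws_collapsed_positions("ab", "xy", [(1, 2)]): A raises ValueError, B returns [(2, 2)]
import Mathlib
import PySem

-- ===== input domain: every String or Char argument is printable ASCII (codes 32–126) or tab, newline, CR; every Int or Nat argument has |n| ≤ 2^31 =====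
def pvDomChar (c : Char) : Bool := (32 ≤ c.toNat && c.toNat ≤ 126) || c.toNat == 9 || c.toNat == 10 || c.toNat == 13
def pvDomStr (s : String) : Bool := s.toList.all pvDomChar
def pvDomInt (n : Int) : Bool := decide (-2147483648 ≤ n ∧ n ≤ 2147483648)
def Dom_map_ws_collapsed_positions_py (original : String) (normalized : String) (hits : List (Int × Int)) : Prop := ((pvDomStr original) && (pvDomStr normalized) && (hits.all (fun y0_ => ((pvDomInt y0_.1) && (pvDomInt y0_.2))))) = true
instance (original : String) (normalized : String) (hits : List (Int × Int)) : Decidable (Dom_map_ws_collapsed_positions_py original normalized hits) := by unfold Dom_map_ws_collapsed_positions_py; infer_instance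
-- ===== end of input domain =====

-- B is a re-implementation: one-pass alignment, bisect lookups and a precomputed next-non-whitespace
-- table instead of A's two scan loops, two dicts and per-hit linear scans; return values agree on Pre_.

-- ===== PORT A =====

/-- `c in " \t"` -/
def pvWs (c : Char) : Bool := c == ' ' || c == '\t'

/-- lookahead `oi >= len(original) or original[oi] not in " \t"` is `¬ pvWsHead rest` -/
def pvWsHead : List Char → Bool
  | [] => false
  | c :: _ => pvWs c

/-- A's two while loops building `o2n`: the first walks `original` (here: the remaining suffix)
    against `normalized` at position `ni`; once `ni = len(normalized)` the guard fails and the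
    second loop appends `len(normalized)` for every remaining original position. -/
def pvA_align (ol : List Char) (nl : List Char) (ni : Nat) : List Int :=
  match ol with
  | [] => []
  | o :: rest =>
    if h : ni < nl.length then
      if o = nl[ni] then (ni : Int) :: pvA_align rest nl (ni + 1)
      else if pvWs o && (nl[ni] == ' ') then
        (ni : Int) :: pvA_align rest nl (if pvWsHead rest then ni else ni + 1)
      else if pvWs o then (ni : Int) :: pvA_align rest nl ni
      else (ni : Int) :: pvA_align rest nl ni
    else (nl.length : Int) :: pvA_align rest nl ni

/-- `for op, np in enumerate(o2n): norm_to_start.setdefault(np, op); norm_to_end[np] = op` -/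
def pvA_dicts (o2n : List Int) : PySem.Dict Int Int × PySem.Dict Int Int :=
  (PySem.List.enumerate o2n).foldl
    (fun d p => (d.1.setdefault p.2 p.1, d.2.insert p.2 p.1))
    (PySem.Dict.empty, PySem.Dict.empty)

/-- `min(i for i, n in enumerate(o2n) if n >= ns)`; `none` is Python's ValueError on an empty
    generator — those inputs are excluded by `Pre_` (the `.getD 0` default is never reached there). -/
def pvA_fallback (o2n : List Int) (ns : Int) : Int :=
  (PySem.List.min? (((PySem.List.enumerate o2n).filter (fun p => ns ≤ p.2)).map (·.1))
    (fun i => i)).getD 0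

/-- `while oe < len(original) and original[oe] in " \t": oe += 1` -/
def pvA_skip (ol : List Char) (oe : Int) : Int :=
  if h : oe < (ol.length : Int) ∧ pvWs (PySem.List.pyGetD ol oe ' ') then pvA_skip ol (oe + 1)
  else oe
termination_by ((ol.length : Int) - oe).toNat
decreasing_by omega

def map_ws_collapsed_positions_py (original : String) (normalized : String) (hits : List (Int × Int)) : List (Int × Int) :=
  let ol := original.toList
  let nl := normalized.toList
  let o2n := pvA_align ol nl 0
  let ds := pvA_dicts o2n
  hits.foldl (fun mapped h =>
    let ns := h.1
    let ne := h.2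
    let os_ : Int := match ds.1.get? ns with
      | some v => v
      | none => pvA_fallback o2n ns
    let oe : Int := match ds.2.get? (ne - 1) with
      | some v => v + 1
      | none => os_ + max 1 (ne - ns)
    mapped ++ [(os_, min (pvA_skip ol oe) (ol.length : Int))]) []

-- ===== PORT B =====

/-- B's single-pass step: the new `ni` after consuming one original character. -/
def pvB_step (nl : List Char) (ni : Nat) (c : Char) (rest : List Char) : Nat :=
  if h : ni < nl.length then
    if c = nl[ni] then ni + 1
    else if pvWs c && (nl[ni] == ' ') && !(pvWsHead rest) then ni + 1
    else ni
  else ni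

/-- B's `for oi in range(L): o2n.append(ni); …` one-pass alignment. -/
def pvB_align (ol : List Char) (nl : List Char) (ni : Nat) : List Int :=
  match ol with
  | [] => []
  | c :: rest => (ni : Int) :: pvB_align rest nl (pvB_step nl ni c rest)

/-- B's right-to-left `nxt` table (`nxt[i]` = first non-whitespace position ≥ i, else `L`);
    `i` is the absolute position of the first remaining character, the extra last entry is `L`. -/
def pvB_nxt (ol : List Char) (i : Nat) : List Int :=
  match ol with
  | [] => [(i : Int)]
  | c :: rest =>
    let t := pvB_nxt rest (i + 1)
    (if pvWs c then t.headI else (i : Int)) :: t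

def map_ws_collapsed_positions_py_alt (original : String) (normalized : String) (hits : List (Int × Int)) : List (Int × Int) :=
  let ol := original.toList
  let nl := normalized.toList
  let o2n := pvB_align ol nl 0
  let L : Int := (ol.length : Int)
  let nxt := pvB_nxt ol 0
  hits.foldl (fun mapped h =>
    let ns := h.1
    let ne := h.2
    -- Source B's hand-written `_bisect_left_i`/`_bisect_right_i` are exactly the standard
    -- bisect loops (lo/hi halving); PySem.List.bisectLeft/bisectRight are that same loop.
    let os_ : Int := (PySem.List.bisectLeft o2n ns : Int)
    let j : Nat := PySem.List.bisectRight o2n (ne - 1)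
    let oe : Int := if 0 < j ∧ o2n.getD (j - 1) 0 = ne - 1 then (j : Int)
      else os_ + max 1 (ne - ns)
    mapped ++ [(os_, if oe < L then PySem.List.pyGetD nxt oe 0 else L)]) []

-- ===== PRECONDITION & SPEC =====

/-- The position in `normalized` aligned to the LAST character of `original` (the last value
    A's first two loops append to `o2n`): the crash boundary of A's `min()` fallback. It only
    tracks one counter through the alignment steps; it is used solely by `Pre_`/`Raises_`. -/
def pvLastNi : List Char → List Char → Nat → Nat
  | [], _, ni => ni
  | [_], _, ni => ni
  | c :: rest, nl, ni => pvLastNi rest nl (pvB_step nl ni c rest)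

-- Pre_ excludes exactly the inputs on which A raises ValueError (`min()` of an empty
-- generator): a hit whose start exceeds the normalized position aligned to the last original
-- character (when original is empty, every hit does). On every input A returns on, Pre_ holds.
def Pre_map_ws_collapsed_positions_py (original : String) (normalized : String) (hits : List (Int × Int)) : Prop :=
  ∀ p ∈ hits, original.toList ≠ [] ∧
    p.1 ≤ (pvLastNi original.toList normalized.toList 0 : Int)

instance (original : String) (normalized : String) (hits : List (Int × Int)) : Decidable (Pre_map_ws_collapsed_positions_py original normalized hits) := by
  unfold Pre_map_ws_collapsed_positions_py; infer_instance

def pvWitness_map_ws_collapsed_positions_py : String × String × (List (Int × Int)) :=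
  ("a \tb", "a b", [(0, 3), (-2, 1), (1, 2)])

-- A raises ValueError (min() of an empty generator) exactly when some hit start exceeds every
-- aligned normalized position (in particular whenever original is empty and hits is not);
-- B returns there, mapping such a hit's start to len(original) via bisect_left.
def Raises_map_ws_collapsed_positions_py (original : String) (normalized : String) (hits : List (Int × Int)) : Prop :=
  ∃ p ∈ hits, original.toList = [] ∨
    (pvLastNi original.toList normalized.toList 0 : Int) < p.1

instance (original : String) (normalized : String) (hits : List (Int × Int)) : Decidable (Raises_map_ws_collapsed_positions_py original normalized hits) := by
  unfold Raises_map_ws_collapsed_positions_py; infer_instance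

def pvRaiseWitness_map_ws_collapsed_positions_py : String × String × (List (Int × Int)) :=
  ("ab", "xy", [(1, 2)])

def pvRaiseWitnessOut_map_ws_collapsed_positions_py : List (Int × Int) := [(2, 2)]

def Spec_map_ws_collapsed_positions_py (original : String) (normalized : String) (hits : List (Int × Int)) (out : List (Int × Int)) : Prop := out = map_ws_collapsed_positions_py_alt original normalized hits
instance (original : String) (normalized : String) (hits : List (Int × Int)) (out : List (Int × Int)) : Decidable (Spec_map_ws_collapsed_positions_py original normalized hits out) := by unfold Spec_map_ws_collapsed_positions_py; infer_instance

-- ===== CLAIM (what is proved, stated in full; the proofs are below) =====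
def Claim_equal_map_ws_collapsed_positions_py : Prop := ∀ (original : String) (normalized : String) (hits : List (Int × Int)), Dom_map_ws_collapsed_positions_py original normalized hits → Pre_map_ws_collapsed_positions_py original normalized hits → Spec_map_ws_collapsed_positions_py original normalized hits (map_ws_collapsed_positions_py original normalized hits)

def Claim_raises_map_ws_collapsed_positions_py : Prop := (∀ (original : String) (normalized : String) (hits : List (Int × Int)), Dom_map_ws_collapsed_positions_py original normalized hits → Raises_map_ws_collapsed_positions_py original normalized hits → ¬ Pre_map_ws_collapsed_positions_py original normalized hits) ∧ (Dom_map_ws_collapsed_positions_py (pvRaiseWitness_map_ws_collapsed_positions_py.1) (pvRaiseWitness_map_ws_collapsed_positions_py.2.1) (pvRaiseWitness_map_ws_collapsed_positions_py.2.2) ∧ Raises_map_ws_collapsed_positions_py (pvRaiseWitness_map_ws_collapsed_positions_py.1) (pvRaiseWitness_map_ws_collapsed_positions_py.2.1) (pvRaiseWitness_map_ws_collapsed_positions_py.2.2) ∧ map_ws_collapsed_positions_py_alt (pvRaiseWitness_map_ws_collapsed_positions_py.1) (pvRaiseWitness_map_ws_collapsed_positions_py.2.1) (pvRaiseWitness_map_ws_collapsed_positions_py.2.2)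 = pvRaiseWitnessOut_map_ws_collapsed_positions_py)

-- ===== LEMMAS AND PROOFS =====

theorem align_eq (ol nl : List Char) (ni : Nat) (h : ni ≤ nl.length) :
    pvA_align ol nl ni = pvB_align ol nl ni := by
  induction ol generalizing ni with
  | nil => rfl
  | cons c rest ih =>
    by_cases hlt : ni < nl.length
    · have hA : pvA_align (c :: rest) nl ni =
          (ni : Int) :: pvA_align rest nl (if c = nl[ni] then ni + 1
            else if pvWs c && (nl[ni] == ' ') then (if pvWsHead rest then ni else ni + 1)
            else ni) := by
        simp only [pvA_align, dif_pos hlt]; split_ifs <;> rfl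
      have hB : pvB_step nl ni c rest = (if c = nl[ni] then ni + 1
            else if pvWs c && (nl[ni] == ' ') then (if pvWsHead rest then ni else ni + 1)
            else ni) := by
        unfold pvB_step; simp only [dif_pos hlt]
        split_ifs with g1 g2 g3 g4 g5 <;> simp_all
      rw [hA]
      show _ = (ni : Int) :: pvB_align rest nl (pvB_step nl ni c rest)
      rw [hB]
      exact congrArg _ (ih _ (by split_ifs <;> omega))
    · have hni : ni = nl.length := by omega
      have hB : pvB_step nl ni c rest = ni := by unfold pvB_step; simp [hlt]
      have hA : pvA_align (c :: rest) nl ni = (nl.length : Int) :: pvA_align rest nl ni := by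
        simp only [pvA_align, dif_neg hlt]
      rw [hA]
      show _ = (ni : Int) :: pvB_align rest nl (pvB_step nl ni c rest)
      rw [hB, hni]
      exact congrArg _ (ih _ le_rfl)

theorem pvB_step_ge (nl : List Char) (ni : Nat) (c : Char) (rest : List Char) :
    ni ≤ pvB_step nl ni c rest := by
  unfold pvB_step; split_ifs <;> omega

theorem pvB_step_le (nl : List Char) (ni : Nat) (c : Char) (rest : List Char)
    (h : ni ≤ nl.length) : pvB_step nl ni c rest ≤ nl.length := by
  unfold pvB_step; split_ifs <;> omega

theorem align_mem (ol nl : List Char) (ni : Nat) (h : ni ≤ nl.length) :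
    ∀ x ∈ pvB_align ol nl ni, (ni : Int) ≤ x ∧ x ≤ (nl.length : Int) := by
  induction ol generalizing ni with
  | nil => intro x hx; simp [pvB_align] at hx
  | cons c rest ih =>
    intro x hx
    rcases (by simpa [pvB_align] using hx : x = (ni : Int) ∨ x ∈ pvB_align rest nl (pvB_step nl ni c rest)) with h1 | h1
    · subst h1; constructor <;> [omega; exact_mod_cast h]
    · have := ih (pvB_step nl ni c rest) (pvB_step_le nl ni c rest h) x h1
      have h2 := pvB_step_ge nl ni c rest
      constructor
      · have : ((ni:Int)) ≤ (pvB_step nl ni c rest : Int) := by exact_mod_cast h2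
        omega
      · exact this.2

theorem align_sorted (ol nl : List Char) (ni : Nat) (h : ni ≤ nl.length) :
    (pvB_align ol nl ni).Pairwise (· ≤ ·) := by
  induction ol generalizing ni with
  | nil => simp [pvB_align]
  | cons c rest ih =>
    rw [pvB_align, List.pairwise_cons]
    refine ⟨fun x hx => ?_, ih _ (pvB_step_le nl ni c rest h)⟩
    have h1 := (align_mem rest nl _ (pvB_step_le nl ni c rest h) x hx).1
    have h2 := pvB_step_ge nl ni c rest
    have : ((ni:Int)) ≤ (pvB_step nl ni c rest : Int) := by exact_mod_cast h2
    omega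

theorem lastNi_mem (ol nl : List Char) (ni : Nat) (hne : ol ≠ []) :
    ((pvLastNi ol nl ni : Nat) : Int) ∈ pvB_align ol nl ni := by
  induction ol generalizing ni with
  | nil => exact absurd rfl hne
  | cons c rest ih =>
    cases rest with
    | nil => simp [pvLastNi, pvB_align]
    | cons d t =>
      have : pvLastNi (c :: d :: t) nl ni = pvLastNi (d :: t) nl (pvB_step nl ni c (d :: t)) := rfl
      rw [this, pvB_align]
      exact List.mem_cons_of_mem _ (ih _ (by simp))

theorem sdFold_get (xs : List Int) (k : Int) : ∀ (s : Int) (d : PySem.Dict Int Int),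
    ((PySem.List.enumerate xs s).foldl (fun d p => d.setdefault p.2 p.1) d).get? k
      = if d.contains k then d.get? k
        else (PySem.List.index? xs k).map (fun n => s + Int.ofNat n) := by
  induction xs with
  | nil =>
    intro s d
    rw [PySem.List.enumerate_nil, List.foldl_nil]
    by_cases hc : d.contains k = true
    · rw [if_pos hc]
    · rw [if_neg hc, (PySem.List.index?_eq_none_iff [] k).mpr (by simp), Option.map_none,
        (PySem.Dict.get?_eq_none_iff_contains d k).mpr (by simpa using hc)]
  | cons x t ih =>
    intro s d
    rw [PySem.List.enumerate_cons, List.foldl_cons, ih]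
    by_cases hxk : x = k
    · subst hxk
      have hcont : (d.setdefault x s).contains x = true := by
        rw [PySem.Dict.contains_setdefault]; simp
      rw [if_pos hcont, PySem.Dict.get?_setdefault_self, PySem.List.index?_cons_self]
      by_cases hdc : d.contains x = true
      · rw [if_pos hdc]
        cases hg : d.get? x with
        | none => exact absurd ((PySem.Dict.get?_eq_none_iff_contains d x).mp hg) (by simp [hdc])
        | some v => simp
      · rw [if_neg hdc, (PySem.Dict.get?_eq_none_iff_contains d x).mpr (by simpa using hdc)]
        simp
    · have hcont : (d.setdefault x s).contains k = d.contains k := by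
        rw [PySem.Dict.contains_setdefault]
        simp [Ne.symm hxk]
      rw [hcont, PySem.List.index?_cons_of_ne t hxk]
      by_cases hdc : d.contains k = true
      · rw [if_pos hdc, if_pos hdc, PySem.Dict.get?_setdefault_of_ne _ _ (Ne.symm hxk)]
      · rw [if_neg hdc, if_neg hdc]
        cases hi : PySem.List.index? t k with
        | none => simp
        | some n =>
          simp only [Option.map_some, Option.some.injEq, Int.ofNat_eq_natCast]
          push_cast
          ring

theorem min_pyRange (a b : Int) (hab : a < b) :
    (PySem.List.min? (PySem.List.pyRange a b 1) (fun i => i)).getD 0 = a := by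
  rw [PySem.List.pyRange_one_cons hab, PySem.List.min?_id_cons]
  have hmem := PySem.List.foldl_min_mem (PySem.List.pyRange (a + 1) b 1) a
  have hle := (PySem.List.foldl_min_le (PySem.List.pyRange (a + 1) b 1) a).1
  rcases hmem with h | h
  · rw [Option.getD_some, h]
  · have := (PySem.List.mem_pyRange_one.mp h).1
    rw [Option.getD_some]
    omega

/-- general start position: A's `norm_to_start.get(ns, min(...))` is `bisect_left` whenever some
    entry of the sorted `o2n` is ≥ `ns` (exactly the inputs where A does not raise). -/
theorem start_eq (o2n : List Int) (ns : Int) (hs : o2n.Pairwise (· ≤ ·))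
    (hex : ∃ x ∈ o2n, ns ≤ x) :
    (match ((PySem.List.enumerate o2n).foldl (fun d p => d.setdefault p.2 p.1)
        PySem.Dict.empty).get? ns with
      | some v => v
      | none => pvA_fallback o2n ns)
    = ((PySem.List.bisectLeft o2n ns : Nat) : Int) := by
  obtain ⟨hle, hbefore, hafter⟩ := PySem.List.bisectLeft_spec o2n ns hs
  set r := PySem.List.bisectLeft o2n ns with hr
  have hpw := List.pairwise_iff_getElem.mp hs
  have hrlt : r < o2n.length := by
    obtain ⟨x, hx, hnsx⟩ := hex
    obtain ⟨j, hj, hgj⟩ := List.mem_iff_getElem.mp hx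
    by_contra hge
    have := hbefore j hj (by omega)
    omega
  have hsd := sdFold_get o2n ns 0 PySem.Dict.empty
  rw [if_neg (by rw [PySem.Dict.contains_empty]; simp)] at hsd
  rw [hsd]
  cases hi : PySem.List.index? o2n ns with
  | some i =>
    obtain ⟨hk, hval, hfirst⟩ := PySem.List.getElem_of_index?_eq_some hi
    have hri : r ≤ i := by
      by_contra hlt
      have := hbefore i hk (by omega)
      omega
    have hir : i = r := by
      by_contra hne
      have hrlti : r < i := by omega
      have h1 := hafter r hrlt le_rfl
      have h2 := hpw r i hrlt hk hrlti
      exact hfirst r hrlti (by omega)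
    simp only [Option.map_some]
    rw [hir]
    show (0 : Int) + Int.ofNat r = _
    simp
  | none =>
    simp only [Option.map_none]
    show pvA_fallback o2n ns = _
    unfold pvA_fallback
    have hdec : o2n = o2n.take r ++ o2n.drop r := (List.take_append_drop r o2n).symm
    have hlt : (o2n.take r).length = r := by simp; omega
    have hfilter : (PySem.List.enumerate o2n 0).filter (fun p => ns ≤ p.2)
        = PySem.List.enumerate (o2n.drop r) ((0 : Int) + (o2n.take r).length) := by
      conv_lhs => rw [hdec]
      rw [PySem.List.enumerate_append, List.filter_append]
      have h1 : (PySem.List.enumerate (o2n.take r) 0).filter (fun p => ns ≤ p.2) = [] := by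
        rw [List.filter_eq_nil_iff]
        intro p hp
        obtain ⟨k, hk, hpk⟩ := (PySem.List.mem_enumerate_iff _ _ _).mp hp
        subst hpk
        have hkr : k < r := by omega
        have : (o2n.take r)[k] = o2n[k]'(by omega) := List.getElem_take
        simp only [decide_eq_true_eq, this]
        have := hbefore k (by omega) hkr
        omega
      have h2 : (PySem.List.enumerate (o2n.drop r) ((0 : Int) + (o2n.take r).length)).filter
          (fun p => ns ≤ p.2) = PySem.List.enumerate (o2n.drop r) ((0 : Int) + (o2n.take r).length) := by
        rw [List.filter_eq_self]
        intro p hp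
        obtain ⟨k, hk, hpk⟩ := (PySem.List.mem_enumerate_iff _ _ _).mp hp
        subst hpk
        have hkl : r + k < o2n.length := by simp at hk; omega
        have : (o2n.drop r)[k] = o2n[r + k]'hkl := List.getElem_drop
        simp only [decide_eq_true_eq, this]
        exact hafter (r + k) hkl (by omega)
      rw [h1, h2, List.nil_append]
    rw [hfilter, PySem.List.map_fst_enumerate]
    have hdl : (o2n.drop r).length = o2n.length - r := List.length_drop
    have hab : (0 : Int) + (o2n.take r).length < 0 + (o2n.take r).length + (o2n.drop r).length := by
      rw [hlt, hdl]; omega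
    rw [min_pyRange _ _ hab, hlt]
    omega

theorem countP_le_take_drop (xs : List Int) (x : Int) (r : Nat) (hr : r ≤ xs.length)
    (hbefore : ∀ (j : Nat) (hj : j < xs.length), j < r → xs[j] ≤ x)
    (hafter : ∀ (j : Nat) (hj : j < xs.length), r ≤ j → x < xs[j]) :
    xs.countP (fun y => y ≤ x) = r := by
  conv_lhs => rw [← List.take_append_drop r xs]
  rw [List.countP_append]
  have h1 : (xs.take r).countP (fun y => y ≤ x) = (xs.take r).length := by
    rw [List.countP_eq_length]
    intro a ha
    obtain ⟨i, hi, hgi⟩ := List.mem_iff_getElem.mp ha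
    have hi' : i < r := by simp at hi; omega
    have : (xs.take r)[i] = xs[i]'(by simp at hi; omega) := List.getElem_take
    simp only [decide_eq_true_eq]
    rw [← hgi, this]
    exact hbefore i (by simp at hi; omega) hi'
  have h2 : (xs.drop r).countP (fun y => y ≤ x) = 0 := by
    rw [List.countP_eq_zero]
    intro a ha
    obtain ⟨i, hi, hgi⟩ := List.mem_iff_getElem.mp ha
    have : (xs.drop r)[i] = xs[r + i]'(by simp at hi; omega) := List.getElem_drop
    simp only [decide_eq_true_eq]
    rw [← hgi, this]
    have := hafter (r + i) (by simp at hi; omega) (by omega)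
    omega
  rw [h1, h2, List.length_take]
  omega

theorem bisectRight_eq_countP (xs : List Int) (x : Int) (hs : xs.Pairwise (· ≤ ·)) :
    PySem.List.bisectRight xs x = xs.countP (fun y => y ≤ x) := by
  obtain ⟨hle, hbefore, hafter⟩ := PySem.List.bisectRight_spec xs x hs
  exact (countP_le_take_drop xs x _ hle hbefore hafter).symm

theorem insFold_enum_get (o2n : List Int) (x : Int) (hs : o2n.Pairwise (· ≤ ·)) :
    ((PySem.List.enumerate o2n).foldl (fun d p => d.insert p.2 p.1) PySem.Dict.empty).get? x =
      if 0 < o2n.countP (fun y => y ≤ x) ∧ o2n.getD (o2n.countP (fun y => y ≤ x) - 1) 0 = x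
      then some ((o2n.countP (fun y => y ≤ x) : Int) - 1) else none := by
  induction o2n using List.reverseRecOn with
  | nil => simp [PySem.List.enumerate_nil, PySem.Dict.get?_empty]
  | append_singleton xs a ih =>
    have hxs : xs.Pairwise (· ≤ ·) := (List.pairwise_append.mp hs).1
    have hax : ∀ y ∈ xs, y ≤ a := by
      have h2 := (List.pairwise_append.mp hs).2.2
      intro y hy; exact h2 y hy a (by simp)
    rw [PySem.List.enumerate_append, List.foldl_append]
    rw [show PySem.List.enumerate [a] (0 + (xs.length : Int)) = [((xs.length : Int), a)] by
      simp [PySem.List.enumerate_cons, PySem.List.enumerate_nil]]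
    simp only [List.foldl_cons, List.foldl_nil]
    rw [PySem.Dict.get?_insert]
    have hcxle : xs.countP (fun y => y ≤ x) ≤ xs.length := List.countP_le_length
    have hca : (xs ++ [a]).countP (fun y => y ≤ x)
        = xs.countP (fun y => y ≤ x) + (if a ≤ x then 1 else 0) := by
      rw [List.countP_append]
      simp only [List.countP_cons, List.countP_nil, Nat.zero_add]
      split_ifs with h1 h2 <;> simp_all
    by_cases hxa : x = a
    · subst hxa
      have hcx : xs.countP (fun y => y ≤ x) = xs.length := by
        rw [List.countP_eq_length]; intro y hy; simpa using hax y hy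
      rw [if_pos rfl, hca, hcx, if_pos le_rfl]
      have hget : (xs ++ [x]).getD (xs.length + 1 - 1) 0 = x := by
        simp
      rw [if_pos ⟨by omega, hget⟩]
      congr 1
      push_cast
      ring
    · rw [if_neg hxa, ih hxs, hca]
      by_cases hale : a ≤ x
      · have hax' : a < x := lt_of_le_of_ne hale (fun he => hxa he.symm)
        have hcx : xs.countP (fun y => y ≤ x) = xs.length := by
          rw [List.countP_eq_length]; intro y hy
          simpa using le_trans (hax y hy) hale
        rw [if_pos hale, hcx]
        have hgetr : (xs ++ [a]).getD (xs.length + 1 - 1) 0 = a := by simp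
        rw [if_neg, if_neg]
        · rintro ⟨-, hgx⟩
          rw [hgetr] at hgx; exact hxa hgx.symm
        · rintro ⟨hpos, hgx⟩
          have hl : xs.length - 1 < xs.length := by omega
          rw [List.getD_eq_getElem xs 0 hl] at hgx
          have := hax _ (List.getElem_mem hl)
          omega
      · rw [if_neg hale]
        simp only [Nat.add_zero]
        by_cases hpos : 0 < xs.countP (fun y => y ≤ x)
        · have hidx : xs.countP (fun y => y ≤ x) - 1 < xs.length := by omega
          have : (xs ++ [a]).getD (xs.countP (fun y => y ≤ x) - 1) 0
              = xs.getD (xs.countP (fun y => y ≤ x) - 1) 0 := by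
            rw [List.getD_eq_getElem _ _ (by simp; omega), List.getD_eq_getElem _ _ hidx]
            exact List.getElem_append_left hidx
          rw [this]
        · have h0 : xs.countP (fun y => y ≤ x) = 0 := by omega
          rw [if_neg (by rintro ⟨h1, -⟩; omega), if_neg (by rintro ⟨h1, -⟩; omega)]

theorem skip_eq (ol : List Char) (oe : Int) (h0 : 0 ≤ oe) :
    pvA_skip ol oe = oe + (((ol.drop oe.toNat).takeWhile pvWs).length : Int) := by
  by_cases hlt : oe < (ol.length : Int)
  · have hidx : oe.toNat < ol.length := by omega
    have hdrop : ol.drop oe.toNat = ol[oe.toNat] :: ol.drop (oe.toNat + 1) :=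
      List.drop_eq_getElem_cons hidx
    have hget : PySem.List.pyGetD ol oe ' ' = ol[oe.toNat] :=
      PySem.List.pyGetD_eq_getElem ol ' ' h0 (by exact_mod_cast hlt)
    by_cases hw : pvWs (ol[oe.toNat]) = true
    · rw [pvA_skip, dif_pos ⟨hlt, by rw [hget]; exact hw⟩]
      rw [skip_eq ol (oe + 1) (by omega)]
      rw [hdrop, List.takeWhile_cons, if_pos hw]
      have : (oe + 1).toNat = oe.toNat + 1 := by omega
      rw [this]
      simp only [List.length_cons]
      push_cast
      ring
    · rw [pvA_skip, dif_neg (by rintro ⟨-, hc⟩; rw [hget] at hc; exact hw hc)]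
      rw [hdrop, List.takeWhile_cons, if_neg hw]
      simp
  · rw [pvA_skip, dif_neg (by rintro ⟨hc, -⟩; exact hlt hc)]
    have : ol.drop oe.toNat = [] := List.drop_of_length_le (by omega)
    rw [this]
    simp
termination_by ((ol.length : Int) - oe).toNat
decreasing_by omega

theorem nxt_ne_nil (ol : List Char) (i : Nat) : pvB_nxt ol i ≠ [] := by
  cases ol <;> simp [pvB_nxt]

theorem nxt_getD (ol : List Char) (i k : Nat) (hk : k ≤ ol.length) :
    (pvB_nxt ol i).getD k 0 = (i : Int) + k + (((ol.drop k).takeWhile pvWs).length : Int) := by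
  induction ol generalizing i k with
  | nil =>
    have : k = 0 := by simpa using hk
    subst this
    simp [pvB_nxt]
  | cons c rest ih =>
    cases k with
    | zero =>
      simp only [pvB_nxt, List.getD_cons_zero, List.drop_zero, List.takeWhile_cons]
      by_cases hw : pvWs c = true
      · rw [if_pos hw, if_pos hw]
        have hh : (pvB_nxt rest (i + 1)).headI = (pvB_nxt rest (i + 1)).getD 0 0 := by
          cases hrest : pvB_nxt rest (i + 1) with
          | nil => exact absurd hrest (nxt_ne_nil rest (i + 1))
          | cons a t => simp
        rw [hh, ih (i + 1) 0 (by omega)]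
        simp only [List.drop_zero, List.length_cons]
        push_cast
        ring
      · rw [if_neg hw, if_neg hw]
        simp
    | succ k' =>
      simp only [pvB_nxt, List.getD_cons_succ, List.drop_succ_cons]
      rw [ih (i + 1) k' (by simpa using hk)]
      push_cast
      ring

theorem tail_eq (ol : List Char) (oe : Int) (h0 : 0 ≤ oe) :
    min (pvA_skip ol oe) ((ol.length : Int))
      = if oe < (ol.length : Int) then PySem.List.pyGetD (pvB_nxt ol 0) oe 0
        else (ol.length : Int) := by
  by_cases hlt : oe < (ol.length : Int)
  · rw [if_pos hlt, skip_eq ol oe h0]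
    have hrun : (((ol.drop oe.toNat).takeWhile pvWs).length : Int) ≤ (ol.length : Int) - oe := by
      have h1 : ((ol.drop oe.toNat).takeWhile pvWs).length ≤ (ol.drop oe.toNat).length :=
        (List.takeWhile_sublist _).length_le
      have h2 : (ol.drop oe.toNat).length = ol.length - oe.toNat := List.length_drop
      omega
    rw [min_eq_left (by omega)]
    have hoe : oe = ((oe.toNat : Nat) : Int) := (Int.toNat_of_nonneg h0).symm
    have hg : PySem.List.pyGetD (pvB_nxt ol 0) oe 0 = (pvB_nxt ol 0).getD oe.toNat 0 := by
      conv_lhs => rw [hoe]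
      rw [PySem.List.pyGetD_natCast]
    rw [hg, nxt_getD ol 0 oe.toNat (by omega)]
    omega
  · rw [if_neg hlt, pvA_skip, dif_neg (by rintro ⟨hc, -⟩; exact hlt hc)]
    rw [min_eq_right (by omega)]

theorem per_hit_eq (ol nl : List Char) (hne : ol ≠ []) (p : Int × Int)
    (hns : p.1 ≤ (pvLastNi ol nl 0 : Int)) :
    (let o2n := pvA_align ol nl 0
     let ds := pvA_dicts o2n
     let os_ : Int := match ds.1.get? p.1 with
       | some v => v
       | none => pvA_fallback o2n p.1
     let oe : Int := match ds.2.get? (p.2 - 1) with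
       | some v => v + 1
       | none => os_ + max 1 (p.2 - p.1)
     (os_, min (pvA_skip ol oe) ((ol.length : Int))))
    = (let o2n := pvB_align ol nl 0
       let nxt := pvB_nxt ol 0
       let os_ : Int := (PySem.List.bisectLeft o2n p.1 : Int)
       let j : Nat := PySem.List.bisectRight o2n (p.2 - 1)
       let oe : Int := if 0 < j ∧ o2n.getD (j - 1) 0 = p.2 - 1 then (j : Int)
         else os_ + max 1 (p.2 - p.1)
       (os_, if oe < (ol.length : Int) then PySem.List.pyGetD nxt oe 0
         else (ol.length : Int))) := by
  simp only [pvA_dicts, PySem.List.foldl_prod_mk (f := fun (d : PySem.Dict Int Int) (p : Int × Int) => d.setdefault p.2 p.1)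
    (g := fun (d : PySem.Dict Int Int) (p : Int × Int) => d.insert p.2 p.1)]
  rw [align_eq ol nl 0 (Nat.zero_le _)]
  have hsorted := align_sorted ol nl 0 (Nat.zero_le _)
  have hex : ∃ x ∈ pvB_align ol nl 0, p.1 ≤ x :=
    ⟨((pvLastNi ol nl 0 : Nat) : Int), lastNi_mem ol nl 0 hne, hns⟩
  have hos := start_eq (pvB_align ol nl 0) p.1 hsorted hex
  have hosnn : (0 : Int) ≤ ((PySem.List.bisectLeft (pvB_align ol nl 0) p.1 : Nat) : Int) := by
    positivity
  rw [hos]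
  have hend := insFold_enum_get (pvB_align ol nl 0) (p.2 - 1) hsorted
  have hj : PySem.List.bisectRight (pvB_align ol nl 0) (p.2 - 1)
      = (pvB_align ol nl 0).countP (fun y => y ≤ p.2 - 1) :=
    bisectRight_eq_countP _ _ hsorted
  rw [hend, hj]
  generalize List.countP (fun y => decide (y ≤ p.2 - 1)) (pvB_align ol nl 0) = cnt
  by_cases hc : 0 < cnt ∧ (pvB_align ol nl 0).getD (cnt - 1) 0 = p.2 - 1
  · rw [if_pos hc, if_pos hc]
    show (_, min (pvA_skip ol ((cnt : Int) - 1 + 1)) ((ol.length : Int))) = _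
    have hmm : ((cnt : Int) - 1) + 1 = (cnt : Int) := by ring
    rw [hmm]
    exact congrArg _ (tail_eq ol _ (by positivity))
  · rw [if_neg hc, if_neg hc]
    show (_, min (pvA_skip ol (_ + max 1 (p.2 - p.1))) ((ol.length : Int))) = _
    exact congrArg _ (tail_eq ol _ (by have := le_max_left (1 : Int) (p.2 - p.1); omega))

-- ===== VERDICT (by name: the statement is the Claim_ definition above) =====
theorem map_ws_collapsed_positions_py_spec : Claim_equal_map_ws_collapsed_positions_py := by
  intro original normalized hits _ hpre
  unfold Spec_map_ws_collapsed_positions_py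
  unfold map_ws_collapsed_positions_py map_ws_collapsed_positions_py_alt
  simp only []
  rw [PySem.List.foldl_append_singleton_eq_map, PySem.List.foldl_append_singleton_eq_map]
  simp only [List.nil_append]
  apply List.map_congr_left
  intro p hp
  obtain ⟨hne, hns⟩ := hpre p hp
  exact per_hit_eq original.toList normalized.toList hne p hns

@[simp] theorem map_ws_collapsed_positions_py_raises : Claim_raises_map_ws_collapsed_positions_py := by
  unfold Claim_raises_map_ws_collapsed_positions_py
  refine ⟨?_, by decide⟩
  intro original normalized hits _ hrai hpre
  obtain ⟨p, hp, hcond⟩ := hrai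
  obtain ⟨hne, hns⟩ := hpre p hp
  rcases hcond with h | h
  · exact hne h
  · omega
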